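-- pv_equiv track=rewrite | github.com/Baksinka/Ylab-Python | Less1/Z14.py | bananas
-- ===== SOURCE A (Python) =====
-- def bananas(strmain) -> set:
--
--     def wordcounter(strmain, strcheck, strnew):
--         if strcheck == '':
--             diff = len(strmain)
--             if diff > 0:
--                 strnew += '-' * diff
--             result.add(strnew)
--             return
--         for i in range(len(strmain) - len(strcheck) + 1):
--
--             if strmain[0] == strcheck[0]:
--
--                 wordcounter(strmain[1:], strcheck[1:], strnew + strcheck[0])
--
--             strnew += '-'
--             strmain = strmain[1:]
--
--     strcheck = 'banana'
--     result = set()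
--     strnew = ''
--
--     if len(strmain) < len(strcheck):
--         return result
--
--     wordcounter(strmain, strcheck, strnew)
--     return result
-- ===== SOURCE B (Python) =====
-- def bananas(strmain) -> set:
--     # One left-to-right pass over the string, carrying all partial pattern
--     # matches as (mask-so-far, letters-matched) states; no recursion, no slicing.
--     pattern = 'banana'
--     states = [('', 0)]
--     for ch in strmain:
--         nxt = []
--         for mask, k in states:
--             if k < len(pattern) and ch == pattern[k]:
--                 nxt.append((mask + ch, k + 1))
--             nxt.append((mask + '-', k))
--         states = nxt
--     return {mask for mask, k in states if k == len(pattern)}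
-- ===== Notes on version B (the rewrite author's own statement) =====
-- stated objective: alternative
-- what changed: Replaced the recursive string-slicing backtracking search by a single iterative left-to-right pass that carries every partial match of the six-letter pattern as a (mask, matched-count) state and collects the completed ones.
import Mathlib
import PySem

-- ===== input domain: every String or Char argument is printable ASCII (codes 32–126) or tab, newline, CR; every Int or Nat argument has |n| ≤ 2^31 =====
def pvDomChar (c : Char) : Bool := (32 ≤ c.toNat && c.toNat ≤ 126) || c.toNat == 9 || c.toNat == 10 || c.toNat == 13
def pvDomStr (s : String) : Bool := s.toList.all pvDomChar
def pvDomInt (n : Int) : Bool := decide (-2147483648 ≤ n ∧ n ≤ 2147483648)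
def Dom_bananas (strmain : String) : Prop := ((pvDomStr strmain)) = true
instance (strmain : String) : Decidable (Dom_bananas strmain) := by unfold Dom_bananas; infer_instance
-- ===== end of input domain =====

-- B replaces A's recursive slicing backtracking by one iterative left-to-right pass carrying partial-match states (alternative decomposition, same result set).

-- ===== PORT A =====
-- wordcounter, returning the strings added to `result` in insertion order.
-- strmain[0]/strcheck[0] are only evaluated on nonempty strings in Python (the loop
-- bound guarantees it); headD '?' is exact there.
mutual
def wcA (s c new : List Char) : List (List Char) :=
  if c = [] then
    let diff := s.length
    let new' := if diff > 0 then new ++ List.replicate diff '-' else new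
    [new']
  else wcLoopA s c new ((s.length : Int) - (c.length : Int) + 1).toNat
termination_by ((if c = [] then 0 else c.length + s.length), (if c = [] then 0 else 1), 0)
decreasing_by all_goals (rcases c with _|⟨ch,_|⟨ch2,c''⟩⟩ <;> rcases s with _|⟨a,s'⟩ <;> simp [Prod.lex_def] <;> first | omega | simp_all)

def wcLoopA (s c new : List Char) (k : Nat) : List (List Char) :=
  match k with
  | 0 => []
  | (k+1) =>
    (if s.headD '?' = c.headD '?' then
        wcA (s.drop 1) (c.drop 1) (new ++ [c.headD '?'])
      else []) ++ wcLoopA (s.drop 1) c (new ++ ['-']) k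
termination_by (c.length + s.length, 0, k)
decreasing_by all_goals (simp_wf; rcases c with _|⟨ch,_|⟨ch2,c''⟩⟩ <;> rcases s with _|⟨a,s'⟩ <;> simp [Prod.lex_def] <;> omega)
end

def bananas (strmain : String) : List String :=
  let strcheck := "banana".toList
  let s := strmain.toList
  if s.length < strcheck.length then []
  else PySem.Set.ofList ((wcA s strcheck []).map String.ofList)

-- ===== PORT B =====
def stepB (p : List Char) (states : List (List Char × Nat)) (ch : Char) : List (List Char × Nat) :=
  states.foldl (fun nxt st =>
    nxt ++ (if st.2 < p.length && (ch == p.getD st.2 '?') then [(st.1 ++ [ch], st.2 + 1)] else [])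
        ++ [(st.1 ++ ['-'], st.2)]) []

def bananas_alt (strmain : String) : List String :=
  let p := "banana".toList
  let final := strmain.toList.foldl (stepB p) [(([] : List Char), 0)]
  PySem.Set.ofList (final.foldl (fun acc st => if st.2 = p.length then acc ++ [String.ofList st.1] else acc) [])

-- ===== PRECONDITION & SPEC =====
def Spec_bananas (strmain : String) (out : List String) : Prop := out = bananas_alt strmain
instance (strmain : String) (out : List String) : Decidable (Spec_bananas strmain out) := by unfold Spec_bananas; infer_instance

-- ===== CLAIM (what is proved, stated in full; the proofs are below) =====
def Claim_equal_bananas : Prop := ∀ (strmain : String), Dom_bananas strmain → Spec_bananas strmain (bananas strmain)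

-- ===== LEMMAS AND PROOFS =====

-- run of B's pass from an arbitrary state list
def runB (p : List Char) (s : List Char) (L : List (List Char × Nat)) : List (List Char × Nat) :=
  s.foldl (stepB p) L

-- extraction of finished states, in B's final-loop form
def extractB (p : List Char) (L : List (List Char × Nat)) : List String :=
  L.foldl (fun acc st => if st.2 = p.length then acc ++ [String.ofList st.1] else acc) []

theorem stepB_flat (p : List Char) (L : List (List Char × Nat)) (ch : Char) :
    stepB p L ch = L.flatMap (fun st =>
      (if st.2 < p.length && (ch == p.getD st.2 '?') then [(st.1 ++ [ch], st.2 + 1)] else [])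
        ++ [(st.1 ++ ['-'], st.2)]) := by
  simp only [stepB, List.append_assoc]
  exact PySem.List.foldl_append_eq_flatMap _ _ _

theorem extractB_flat (p : List Char) (L : List (List Char × Nat)) :
    extractB p L = (L.filter (fun st => decide (st.2 = p.length))).map (fun st => String.ofList st.1) := by
  simpa using PySem.List.foldl_append_ite (fun st => st.2 = p.length) (fun st => String.ofList st.1) L []

theorem stepB_append (p : List Char) (L₁ L₂ : List (List Char × Nat)) (ch : Char) :
    stepB p (L₁ ++ L₂) ch = stepB p L₁ ch ++ stepB p L₂ ch := by
  simp [stepB_flat]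

theorem runB_append (p s : List Char) (L₁ L₂ : List (List Char × Nat)) :
    runB p s (L₁ ++ L₂) = runB p s L₁ ++ runB p s L₂ := by
  induction s generalizing L₁ L₂ with
  | nil => simp [runB]
  | cons a s ih => simp only [runB, List.foldl_cons, stepB_append]; exact ih _ _

theorem extractB_append (p : List Char) (L₁ L₂ : List (List Char × Nat)) :
    extractB p (L₁ ++ L₂) = extractB p L₁ ++ extractB p L₂ := by
  simp [extractB_flat]

theorem runB_nil (p s : List Char) : runB p s [] = [] := by
  induction s with
  | nil => rfl
  | cons a s ih => simpa [runB, stepB] using ih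

-- a state that has already matched everything just pads with dashes
theorem run_done (s mask : List Char) :
    extractB "banana".toList (runB "banana".toList s [(mask, 6)]) = [String.ofList (mask ++ List.replicate s.length '-')] := by
  induction s generalizing mask with
  | nil => simp [runB, extractB]
  | cons a s ih =>
    rw [show runB "banana".toList (a :: s) [(mask, 6)]
          = runB "banana".toList s (stepB "banana".toList [(mask, 6)] a) from rfl]
    rw [show stepB "banana".toList [(mask, 6)] a = [(mask ++ ['-'], 6)] by simp [stepB_flat]]
    rw [ih]
    simp [List.replicate_succ, List.append_assoc]

-- a state with too few characters left can never finish
theorem run_dead (s mask : List Char) (k : Nat) (hk : k < 6) (hs : s.length < 6 - k) :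
    extractB "banana".toList (runB "banana".toList s [(mask, k)]) = [] := by
  induction s generalizing mask k with
  | nil => simp [runB, extractB, Nat.ne_of_lt hk]
  | cons a s ih =>
    have hsplit : runB "banana".toList (a :: s) [(mask, k)]
        = runB "banana".toList s
            (if k < 6 ∧ a = "banana".toList.getD k '?' then [(mask ++ [a], k + 1)] else [])
          ++ runB "banana".toList s [(mask ++ ['-'], k)] := by
      rw [show runB "banana".toList (a :: s) [(mask, k)]
            = runB "banana".toList s (stepB "banana".toList [(mask, k)] a) from rfl]
      rw [← runB_append]
      congr 1
      · simp [stepB_flat]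
    rw [hsplit, extractB_append]
    have hlen : s.length < 6 - k := by simp at hs; omega
    rw [ih _ k hk hlen]
    by_cases hc : k < 6 ∧ a = "banana".toList.getD k '?'
    · have hk1 : k + 1 < 6 := by simp at hs; omega
      have hl1 : s.length < 6 - (k + 1) := by simp at hs; omega
      rw [if_pos hc, ih _ (k + 1) hk1 hl1]
      rfl
    · rw [if_neg hc, runB_nil]
      rfl

theorem wcLoopA_zero (s c new : List Char) : wcLoopA s c new 0 = [] := by
  unfold wcLoopA
  rfl

-- main bridge: A's DFS from pattern suffix k equals B's pass from state (mask, k)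
theorem main_bridge (s : List Char) (mask : List Char) (k : Nat) (hk : k ≤ 6) :
    (wcA s ("banana".toList.drop k) mask).map String.ofList
      = extractB "banana".toList (runB "banana".toList s [(mask, k)]) := by
  induction s generalizing mask k with
  | nil =>
    by_cases h6 : k = 6
    · subst h6
      rw [run_done]
      rw [show ("banana".toList.drop 6) = ([] : List Char) from rfl]
      simp [wcA]
    · have hk' : k < 6 := lt_of_le_of_ne hk h6
      have hclen : ("banana".toList.drop k).length = 6 - k := by
        rw [List.length_drop, show "banana".toList.length = 6 from rfl]
      have hcne : ("banana".toList.drop k) ≠ [] := by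
        apply List.ne_nil_of_length_pos; omega
      rw [run_dead [] mask k hk' (by simp; omega)]
      unfold wcA
      rw [if_neg hcne]
      rw [show ((([] : List Char).length : Int) - (("banana".toList.drop k).length : Int) + 1).toNat = 0 by
        rw [hclen]; simp; omega]
      rw [wcLoopA_zero]
      rfl
  | cons a s ih =>
    by_cases h6 : k = 6
    · subst h6
      rw [run_done]
      rw [show ("banana".toList.drop 6) = ([] : List Char) from rfl]
      simp [wcA]
    · have hk' : k < 6 := lt_of_le_of_ne hk h6
      have hclen : ("banana".toList.drop k).length = 6 - k := by
        rw [List.length_drop, show "banana".toList.length = 6 from rfl]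
      have hcne : ("banana".toList.drop k) ≠ [] := by
        apply List.ne_nil_of_length_pos; omega
      have hhd : ("banana".toList.drop k).headD '?' = "banana".toList.getD k '?' := by
        simp [List.head?_drop, List.getD]
      have hdd : ("banana".toList.drop k).drop 1 = "banana".toList.drop (k + 1) := by
        rw [List.drop_drop]
      have hsplit : runB "banana".toList (a :: s) [(mask, k)]
          = runB "banana".toList s
              (if k < 6 ∧ a = "banana".toList.getD k '?' then [(mask ++ [a], k + 1)] else [])
            ++ runB "banana".toList s [(mask ++ ['-'], k)] := by
        rw [show runB "banana".toList (a :: s) [(mask, k)]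
              = runB "banana".toList s (stepB "banana".toList [(mask, k)] a) from rfl]
        rw [← runB_append]
        congr 1
        · simp [stepB_flat]
      rw [hsplit, extractB_append]
      unfold wcA
      rw [if_neg hcne]
      by_cases hshort : s.length + 1 < 6 - k
      · rw [show ((((a :: s).length : Int) - (("banana".toList.drop k).length : Int) + 1).toNat) = 0 by
          rw [hclen]; simp; omega]
        rw [wcLoopA_zero]
        rw [run_dead s (mask ++ ['-']) k hk' (by omega)]
        by_cases hc : k < 6 ∧ a = "banana".toList.getD k '?'
        · rw [if_pos hc, run_dead s (mask ++ [a]) (k + 1) (by omega) (by omega)]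
          rfl
        · rw [if_neg hc, runB_nil]
          rfl
      · rw [show ((((a :: s).length : Int) - (("banana".toList.drop k).length : Int) + 1).toNat)
            = (((s.length : Int) - (("banana".toList.drop k).length : Int) + 1).toNat) + 1 by
          rw [hclen]; simp; omega]
        rw [wcLoopA]
        simp only [List.drop_succ_cons, List.drop_zero, List.headD_cons]
        have htail : wcLoopA s ("banana".toList.drop k) (mask ++ ['-'])
              (((s.length : Int) - (("banana".toList.drop k).length : Int) + 1).toNat)
            = wcA s ("banana".toList.drop k) (mask ++ ['-']) := by
          conv_rhs => unfold wcA
          rw [if_neg hcne]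
        rw [htail]
        rw [List.map_append]
        rw [ih (mask ++ ['-']) k hk]
        congr 1
        by_cases hmatch : a = "banana".toList.getD k '?'
        · rw [if_pos (by rw [hhd]; exact hmatch)]
          rw [if_pos ⟨hk', hmatch⟩]
          rw [hdd, hhd, ← hmatch]
          rw [ih (mask ++ [a]) (k + 1) (by omega)]
        · rw [if_neg (by intro h; exact hmatch (hhd ▸ h))]
          rw [if_neg (by rintro ⟨-, h⟩; exact hmatch h)]
          rw [runB_nil]
          rfl

-- ===== VERDICT (by name: the statement is the Claim_ definition above) =====
theorem bananas_spec : Claim_equal_bananas := by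
  intro strmain _
  show bananas strmain = bananas_alt strmain
  have halt : bananas_alt strmain
      = PySem.Set.ofList (extractB "banana".toList (runB "banana".toList strmain.toList [([], 0)])) := rfl
  have hA : bananas strmain
      = if strmain.toList.length < 6 then []
        else PySem.Set.ofList ((wcA strmain.toList "banana".toList []).map String.ofList) := rfl
  rw [halt, hA]
  by_cases h : strmain.toList.length < 6
  · rw [if_pos h, run_dead strmain.toList [] 0 (by omega) (by omega)]
    rfl
  · rw [if_neg h]
    have hb := main_bridge strmain.toList [] 0 (by omega)
    rw [show "banana".toList.drop 0 = "banana".toList from rfl] at hb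
    rw [hb]
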